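-- pv_equiv track=rewrite | github.com/stepheniedepapel-del/DI_Bootcamp | WEEK1/DAY 4/week1 day4 daily challenge.py/week 1day4 daily challenge.py | filter_alpha_with_spaces
-- ===== SOURCE A (Python) =====
-- def filter_alpha_with_spaces(column_string):
--     """
--     Filter alpha characters from a column string.
--     Replace groups of non-alpha characters between alpha characters with a single space.
--
--     Logic:
--     - When we see an alpha char after seeing non-alpha chars (and we've seen alpha before), add space then char
--     - When we see consecutive alpha chars, just add them
--     - Skip leading non-alpha chars until we see first alpha
--     """
--     result = []
--     seen_alpha = False  # Track if we've encountered any alpha character yet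
--     pending_space = False  # Track if we need to add a space before next alpha
--
--     for char in column_string:
--         if char.isalpha():
--             # This is an alpha character
--             if pending_space and seen_alpha:
--                 # We had non-alpha chars before this, and we've seen alpha before
--                 # So add a space separator
--                 result.append(' ')
--
--             result.append(char)
--             seen_alpha = True
--             pending_space = False
--
--         else:
--             # This is a non-alpha character (symbol, number, space, etc.)
--             if seen_alpha:
--                 # Only mark for space if we've already seen an alpha char
--                 # (don't add spaces before the first alpha char)
--                 pending_space = True
--
--     return ''.join(result)
-- ===== SOURCE B (Python) =====
-- def filter_alpha_with_spaces(column_string):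
--     """Join the maximal runs of alphabetic characters with single spaces."""
--     words = []
--     i = 0
--     n = len(column_string)
--     while i < n:
--         if column_string[i].isalpha():
--             j = i
--             while j < n and column_string[j].isalpha():
--                 j += 1
--             words.append(column_string[i:j])
--             i = j
--         else:
--             i += 1
--     return ' '.join(words)
-- ===== Notes on version B (the rewrite author's own statement) =====
-- stated objective: idiomatic
-- what changed: Replaces A's seen_alpha/pending_space flag machine with a direct decomposition: scan out the maximal alphabetic runs and ' '.join them.
import Mathlib
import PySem

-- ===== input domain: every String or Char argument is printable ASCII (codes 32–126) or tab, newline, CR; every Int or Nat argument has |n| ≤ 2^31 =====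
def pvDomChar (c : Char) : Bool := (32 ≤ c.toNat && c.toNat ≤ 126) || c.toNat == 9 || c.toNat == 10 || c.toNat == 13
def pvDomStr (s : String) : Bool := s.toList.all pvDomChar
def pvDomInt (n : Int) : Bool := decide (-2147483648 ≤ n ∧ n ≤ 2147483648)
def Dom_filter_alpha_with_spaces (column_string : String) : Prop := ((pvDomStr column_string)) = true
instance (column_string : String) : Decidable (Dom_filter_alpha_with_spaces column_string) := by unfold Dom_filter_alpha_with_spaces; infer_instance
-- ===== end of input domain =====

-- B replaces A's seen_alpha/pending_space flag machine by extracting the maximal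
-- alphabetic runs and joining them with single spaces (idiomatic decomposition).

-- ===== PORT A =====
-- A's for-loop over the characters with state (result, seen_alpha, pending_space).
def pvLoopA : List Char → List Char → Bool → Bool → List Char
  | [], acc, _, _ => acc
  | c :: cs, acc, seen, pending =>
    if PySem.Chars.isalpha c then
      pvLoopA cs (acc ++ (if pending && seen then [' ', c] else [c])) true false
    else
      pvLoopA cs acc seen (if seen then true else pending)

def filter_alpha_with_spaces (column_string : String) : String :=
  String.mk (pvLoopA column_string.toList [] false false)

-- ===== PORT B =====
-- Source B's outer while-loop: skip non-alpha chars; at an alpha char the inner while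
-- scan (j) takes the whole run (takeWhile/dropWhile is that inner scan).
def pvWordsB : List Char → List (List Char)
  | [] => []
  | c :: cs =>
    if PySem.Chars.isalpha c then
      (c :: cs.takeWhile PySem.Chars.isalpha) :: pvWordsB (cs.dropWhile PySem.Chars.isalpha)
    else
      pvWordsB cs
termination_by cs => cs.length
decreasing_by
  · simp only [List.length_cons]
    have := cs.length_dropWhile_le (p := PySem.Chars.isalpha)
    omega
  · simp

-- ' '.join: the separator-prefixed tail, and the join itself.
def pvPrefSp : List (List Char) → List Char
  | [] => []
  | w :: ws => ' ' :: w ++ pvPrefSp ws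

def pvJoinSp : List (List Char) → List Char
  | [] => []
  | w :: ws => w ++ pvPrefSp ws

def filter_alpha_with_spaces_alt (column_string : String) : String :=
  String.mk (pvJoinSp (pvWordsB column_string.toList))

-- ===== PRECONDITION & SPEC =====
def Spec_filter_alpha_with_spaces (column_string : String) (out : String) : Prop := out = filter_alpha_with_spaces_alt column_string
instance (column_string : String) (out : String) : Decidable (Spec_filter_alpha_with_spaces column_string out) := by unfold Spec_filter_alpha_with_spaces; infer_instance

-- ===== CLAIM (what is proved, stated in full; the proofs are below) =====
def Claim_equal_filter_alpha_with_spaces : Prop := ∀ (column_string : String), Dom_filter_alpha_with_spaces column_string → Spec_filter_alpha_with_spaces column_string (filter_alpha_with_spaces column_string)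

-- ===== LEMMAS AND PROOFS =====

-- The three reachable states of A's loop, characterised against B's run decomposition.
lemma pvLoopA_states : ∀ (cs : List Char) (acc : List Char),
    (pvLoopA cs acc true true = acc ++ pvPrefSp (pvWordsB cs)) ∧
    (pvLoopA cs acc true false =
      acc ++ cs.takeWhile PySem.Chars.isalpha
          ++ pvPrefSp (pvWordsB (cs.dropWhile PySem.Chars.isalpha))) ∧
    (pvLoopA cs acc false false = acc ++ pvJoinSp (pvWordsB cs)) := by
  intro cs
  induction cs with
  | nil => intro acc; simp [pvLoopA, pvWordsB, pvPrefSp, pvJoinSp]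
  | cons c cs ih =>
    intro acc
    by_cases h : PySem.Chars.isalpha c = true
    · refine ⟨?_, ?_, ?_⟩ <;>
        simp [pvLoopA, h, pvWordsB, pvPrefSp, pvJoinSp,
              (ih (acc ++ [' ', c])).2.1, (ih (acc ++ [c])).2.1]
    · refine ⟨?_, ?_, ?_⟩ <;>
        simp [pvLoopA, h, pvWordsB, pvJoinSp, (ih acc).1, (ih acc).2.2]

-- ===== VERDICT (by name: the statement is the Claim_ definition above) =====
theorem filter_alpha_with_spaces_spec : Claim_equal_filter_alpha_with_spaces := by
  intro s _
  unfold Spec_filter_alpha_with_spaces filter_alpha_with_spaces filter_alpha_with_spaces_alt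
  rw [(pvLoopA_states s.toList []).2.2]
  simp
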